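-- pv_equiv track=rewrite | github.com/alexander-hanel/cospare | idb2jsin.py | instructionCount
-- ===== SOURCE A (Python) =====
-- def instructionCount(instructionList):
--     'gets the unique count of each instruction line in a function'
--     count = {}
--     for mnem in instructionList:
--         if mnem in count:
--             count[mnem] += 1
--         else:
--             count[mnem]  = 1
--     # returns dictionary { sub_func { unique_norm_intruction1: count_value, unique_norm_intruction2: count_value2}}
--     return count
-- ===== SOURCE B (Python) =====
-- def instructionCount(instructionList):
--     'gets the unique count of each instruction line in a function'
--     return {m: instructionList.count(m) for m in dict.fromkeys(instructionList)}
-- ===== Notes on version B (the rewrite author's own statement) =====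
-- stated objective: alternative
-- what changed: Replaces the single accumulating dict pass with a table of first-appearance-ordered unique keys (dict.fromkeys) followed by a full-list count scan per key.
import Mathlib
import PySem

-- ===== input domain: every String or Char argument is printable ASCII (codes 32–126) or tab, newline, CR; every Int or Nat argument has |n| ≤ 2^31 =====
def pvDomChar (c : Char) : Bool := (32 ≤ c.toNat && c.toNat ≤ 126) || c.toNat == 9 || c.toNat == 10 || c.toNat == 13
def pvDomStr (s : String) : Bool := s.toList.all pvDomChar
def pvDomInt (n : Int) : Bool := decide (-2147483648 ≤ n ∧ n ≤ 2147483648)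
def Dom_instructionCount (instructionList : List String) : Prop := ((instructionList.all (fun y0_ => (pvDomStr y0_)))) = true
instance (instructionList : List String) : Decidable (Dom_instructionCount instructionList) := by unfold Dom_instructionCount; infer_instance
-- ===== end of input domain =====

-- ===== PORT A =====
-- B counts each unique mnemonic (first-appearance order) with a per-key scan instead of one accumulating dict pass; same values.
def instructionCount (instructionList : List String) : List (String × Int) :=
  (instructionList.foldl
    (fun count mnem =>
      if count.contains mnem then count.insert mnem (count.getD mnem 0 + 1)
      else count.insert mnem 1)
    PySem.Dict.empty).items

-- ===== PORT B =====
def instructionCount_alt (instructionList : List String) : List (String × Int) :=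
  (PySem.List.dedup instructionList).map
    (fun m => (m, (PySem.List.count instructionList m : Int)))

-- ===== PRECONDITION & SPEC =====
def Spec_instructionCount (instructionList : List String) (out : List (String × Int)) : Prop := out = instructionCount_alt instructionList
instance (instructionList : List String) (out : List (String × Int)) : Decidable (Spec_instructionCount instructionList out) := by unfold Spec_instructionCount; infer_instance

-- ===== CLAIM (what is proved, stated in full; the proofs are below) =====
def Claim_equal_instructionCount : Prop := ∀ (instructionList : List String), Dom_instructionCount instructionList → Spec_instructionCount instructionList (instructionCount instructionList)

-- ===== LEMMAS AND PROOFS =====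

-- ===== VERDICT (by name: the statement is the Claim_ definition above) =====
-- A's loop body equals the Counter step once 'not contains → getD = 0' is applied.
theorem pv_step_eq (d : PySem.Dict String Int) (x : String) :
    (if d.contains x then d.insert x (d.getD x 0 + 1) else d.insert x 1)
      = d.insert x (d.getD x 0 + 1) := by
  by_cases h : d.contains x = true
  · simp [h]
  · simp only [Bool.not_eq_true] at h
    rw [if_neg (by simp [h]), PySem.Dict.getD_of_not_contains (h := h)]; norm_num

theorem pv_foldl_eq (l : List String) (d : PySem.Dict String Int) :
    l.foldl (fun c m => if c.contains m then c.insert m (c.getD m 0 + 1) else c.insert m 1) d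
      = l.foldl (fun c m => c.insert m (c.getD m 0 + 1)) d := by
  induction l generalizing d with
  | nil => rfl
  | cons x xs ih => rw [List.foldl_cons, List.foldl_cons, pv_step_eq]; exact ih _

theorem instructionCount_spec : Claim_equal_instructionCount := by
  intro xs _
  unfold Spec_instructionCount instructionCount instructionCount_alt
  rw [pv_foldl_eq, PySem.Dict.foldl_insert_getD_add_one_eq_counter,
      PySem.Dict.items_counter]
  simp
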